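-- pv_equiv track=rewrite | github.com/duspic/schrotomath | app/solver.py | groupDigits
-- ===== SOURCE A (Python) =====
-- def groupDigits(equation):
--     # Each character is parsed separately, but numbers aren't always single characters
--     # Group all consecutive digits in a list
--
--     output = []
--     number = ""
--
--     for char in equation:
--         if char.isdigit():
--             number += char
--         else:
--             if number:
--                 output.append(number)
--                 number = ""
--             output += char
--
--     if number:
--         output.append(number)
--
--     return output
-- ===== SOURCE B (Python) =====
-- def groupDigits(equation):
--     # Two-pointer scan: slice out each maximal digit run in one step,
--     # emit every other character individually.
--     output = []
--     i, n = 0, len(equation)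
--     while i < n:
--         if equation[i].isdigit():
--             j = i + 1
--             while j < n and equation[j].isdigit():
--                 j += 1
--             output.append(equation[i:j])
--             i = j
--         else:
--             output.append(equation[i])
--             i += 1
--     return output
-- ===== Notes on version B (the rewrite author's own statement) =====
-- stated objective: alternative
-- what changed: Replaces the character-accumulator loop (build up 'number', flush it on non-digits and at the end) with a two-pointer scan that slices out each maximal digit run directly and advances past it.
import Mathlib
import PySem

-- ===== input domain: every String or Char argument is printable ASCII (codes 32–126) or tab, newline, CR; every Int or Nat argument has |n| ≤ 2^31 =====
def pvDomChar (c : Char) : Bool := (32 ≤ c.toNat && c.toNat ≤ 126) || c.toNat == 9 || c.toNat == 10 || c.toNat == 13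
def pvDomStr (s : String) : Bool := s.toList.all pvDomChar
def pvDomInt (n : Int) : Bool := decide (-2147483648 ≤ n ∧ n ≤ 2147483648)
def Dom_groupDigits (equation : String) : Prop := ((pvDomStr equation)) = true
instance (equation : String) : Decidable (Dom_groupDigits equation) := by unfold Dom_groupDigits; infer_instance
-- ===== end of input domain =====

-- B replaces A's character-accumulator loop with a two-pointer scan slicing out each
-- maximal digit run (objective: alternative; same O(n) cost, no speed claim).

-- ===== PORT A =====
-- A's loop over the characters with state (output, number); at the end the pending
-- number is flushed.  'output += char' appends the one-character string.
def gdLoopA (cs : List Char) (out : List String) (num : List Char) : List String :=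
  match cs with
  | [] => if num ≠ [] then out ++ [String.ofList num] else out
  | c :: rest =>
      if PySem.Chars.isdigit c then
        gdLoopA rest out (num ++ [c])
      else
        gdLoopA rest ((if num ≠ [] then out ++ [String.ofList num] else out) ++ [String.ofList [c]]) []

def groupDigits (equation : String) : List String :=
  gdLoopA equation.toList [] []

-- ===== PORT B =====
-- B's outer while: on a digit, the inner while advances j to the end of the run
-- (takeWhile/dropWhile = the slice equation[i:j] and the new position j).
def gdAltGo : List Char → List String
  | [] => []
  | c :: rest =>
      if PySem.Chars.isdigit c then
        String.ofList (c :: rest.takeWhile PySem.Chars.isdigit)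
          :: gdAltGo (rest.dropWhile PySem.Chars.isdigit)
      else
        String.ofList [c] :: gdAltGo rest
termination_by cs => cs.length
decreasing_by
  · exact Nat.lt_succ_of_le (List.length_dropWhile_le _ _)
  · exact Nat.lt_succ_self _

def groupDigits_alt (equation : String) : List String :=
  gdAltGo equation.toList

-- ===== PRECONDITION & SPEC =====
def Spec_groupDigits (equation : String) (out : List String) : Prop := out = groupDigits_alt equation
instance (equation : String) (out : List String) : Decidable (Spec_groupDigits equation out) := by unfold Spec_groupDigits; infer_instance

-- ===== CLAIM (what is proved, stated in full; the proofs are below) =====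
def Claim_equal_groupDigits : Prop := ∀ (equation : String), Dom_groupDigits equation → Spec_groupDigits equation (groupDigits equation)

-- ===== LEMMAS AND PROOFS =====

-- A's loop only ever appends to 'out'.
theorem gdLoopA_out (cs : List Char) (out : List String) (num : List Char) :
    gdLoopA cs out num = out ++ gdLoopA cs [] num := by
  induction cs generalizing out num with
  | nil => unfold gdLoopA; split_ifs <;> simp
  | cons c rest ih =>
      simp only [gdLoopA]
      by_cases hd : PySem.Chars.isdigit c = true
      · simp only [hd, if_true]
        exact ih out (num ++ [c])
      · simp only [Bool.not_eq_true] at hd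
        simp only [hd, Bool.false_eq_true, if_false]
        rw [ih (((if num ≠ [] then out ++ [String.ofList num] else out)) ++ [String.ofList [c]]) [],
            ih (((if num ≠ [] then [] ++ [String.ofList num] else [])) ++ [String.ofList [c]]) []]
        split_ifs <;> simp

-- One non-digit step of A's loop, with the pending run and the character flushed.
theorem gdLoopA_cons_neg (c : Char) (rest : List Char) (out : List String) (num : List Char)
    (hd : PySem.Chars.isdigit c = false) :
    gdLoopA (c :: rest) out num
      = out ++ (if num ≠ [] then [String.ofList num] else []) ++ [String.ofList [c]]
          ++ gdLoopA rest [] [] := by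
  simp only [gdLoopA]
  simp only [hd, Bool.false_eq_true, if_false]
  rw [gdLoopA_out]
  split_ifs <;> simp

-- With a nonempty pending run 'num', A's loop finishes the run with the following
-- digits and continues with the rest.
theorem gdLoopA_pending (cs : List Char) (num : List Char) (h : num ≠ []) :
    gdLoopA cs [] num
      = String.ofList (num ++ cs.takeWhile PySem.Chars.isdigit)
          :: gdLoopA (cs.dropWhile PySem.Chars.isdigit) [] [] := by
  induction cs generalizing num with
  | nil => simp [gdLoopA, h]
  | cons c rest ih =>
      by_cases hd : PySem.Chars.isdigit c = true
      · simp only [gdLoopA]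
        simp only [hd, if_true]
        rw [ih (num ++ [c]) (by simp)]
        simp [hd]
      · simp only [Bool.not_eq_true] at hd
        rw [gdLoopA_cons_neg _ _ _ _ hd, List.takeWhile_cons, List.dropWhile_cons]
        simp only [hd, Bool.false_eq_true, if_false]
        rw [gdLoopA_cons_neg _ _ _ _ hd]
        simp [h]

theorem gdLoopA_eq_gdAltGo (cs : List Char) : gdLoopA cs [] [] = gdAltGo cs := by
  induction hn : cs.length using Nat.strong_induction_on generalizing cs with
  | _ n ih =>
    match cs, hn with
    | [], _ => simp [gdLoopA, gdAltGo]
    | c :: rest, hn =>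
      by_cases hd : PySem.Chars.isdigit c = true
      · simp only [gdLoopA]
        simp only [hd, if_true, List.nil_append]
        rw [gdLoopA_pending rest [c] (by simp)]; simp only [gdAltGo]
        simp only [hd, if_true, List.singleton_append]
        congr 1
        exact ih _ (by subst hn; exact Nat.lt_succ_of_le (List.length_dropWhile_le _ _)) _ rfl
      · simp only [Bool.not_eq_true] at hd
        rw [gdLoopA_cons_neg _ _ _ _ hd]; simp only [gdAltGo]
        simp only [hd, Bool.false_eq_true, if_false]
        simp only [ne_eq, not_true_eq_false, if_false, List.nil_append, List.singleton_append,
          List.cons.injEq, true_and]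
        exact ih _ (by subst hn; exact Nat.lt_succ_self _) _ rfl

-- ===== VERDICT (by name: the statement is the Claim_ definition above) =====
theorem groupDigits_spec : Claim_equal_groupDigits := by
  intro equation _
  unfold Spec_groupDigits groupDigits groupDigits_alt
  exact gdLoopA_eq_gdAltGo _
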